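-- pv_equiv track=rewrite | github.com/redteam-project/compliant | library/aide_ruleset.py | remove_options
-- ===== SOURCE A (Python) =====
-- def remove_options(existing_options, options_to_remove):
--     changed = False
--     options_removed = []
--
--     # Let's check to see if there are any args to remove by finding the intersection
--     # of the rule's current args and the args_to_remove lists
--     if list(set(existing_options) & set(options_to_remove)):
--         # There are args to remove, so we create a list of new_args absent the args
--         # to remove.
--         existing_options = [option for option in existing_options if option not in options_to_remove]
--         options_removed = [option for option in existing_options if option in options_to_remove]
--         changed = True
--
--
--     return changed, existing_options, options_removed
-- ===== SOURCE B (Python) =====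
-- def remove_options(existing_options, options_to_remove):
--     banned = set(options_to_remove)
--     changed = False
--     kept = list(existing_options)
--     # delete matching entries in place, scanning indices back-to-front so
--     # deletions never shift the indices still to be visited
--     for i in range(len(kept) - 1, -1, -1):
--         if kept[i] in banned:
--             del kept[i]
--             changed = True
--     # the third component is always [] (as in the original: it is computed
--     # from the already-filtered list, so nothing ever matches)
--     return changed, kept, []
-- ===== Notes on version B (the rewrite author's own statement) =====
-- stated objective: alternative
-- what changed: Instead of A's set-intersection guard followed by two membership-comprehension passes over the list, B copies the list once and deletes matching entries in place by index, scanning back-to-front against a prebuilt set, setting the changed flag at each deletion; the third component stays [] exactly as A returns it (A computes it from the already-filtered list, so nothing ever matches).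
import Mathlib
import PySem

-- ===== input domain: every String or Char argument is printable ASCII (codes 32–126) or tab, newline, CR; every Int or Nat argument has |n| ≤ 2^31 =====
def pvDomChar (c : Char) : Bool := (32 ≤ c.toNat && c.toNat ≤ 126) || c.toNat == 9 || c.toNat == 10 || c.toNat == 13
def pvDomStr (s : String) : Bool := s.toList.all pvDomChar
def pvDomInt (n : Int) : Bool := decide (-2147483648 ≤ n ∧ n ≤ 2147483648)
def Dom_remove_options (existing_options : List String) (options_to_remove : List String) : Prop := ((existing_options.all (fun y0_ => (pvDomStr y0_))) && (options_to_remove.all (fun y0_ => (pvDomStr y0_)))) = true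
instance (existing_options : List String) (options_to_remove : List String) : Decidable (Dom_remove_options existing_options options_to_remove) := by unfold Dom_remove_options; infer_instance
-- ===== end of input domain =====

-- B deletes matching entries in place by index, scanning a copied list back-to-front,
-- instead of A's intersection guard plus two comprehension passes; same return value.

-- ===== PORT A =====
def remove_options (existing_options : List String) (options_to_remove : List String) : Bool × List String × List String :=
  -- changed = False; options_removed = []
  -- if list(set(existing_options) & set(options_to_remove)):  (truthy ↔ nonempty)
  if (PySem.Set.inter (PySem.Set.ofList existing_options) (PySem.Set.ofList options_to_remove)) ≠ [] then
    -- existing_options = [o for o in existing_options if o not in options_to_remove]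
    let existing_options' := existing_options.filter (fun o => !(options_to_remove.contains o))
    -- options_removed = [o for o in existing_options if o in options_to_remove]  (on the filtered list)
    let options_removed := existing_options'.filter (fun o => options_to_remove.contains o)
    (true, existing_options', options_removed)
  else
    (false, existing_options, [])

-- ===== PORT B =====
-- the back-to-front deletion loop: state is (kept, changed).
-- kept[i] is always in range here (the loop counts down within the current length,
-- and deletions only ever happen at indices above those still to be visited),
-- so the `none` branch of pyGet? is unreachable; i ≥ 0 along the range, so
-- `i.toNat` is exact for `del kept[i]` (= eraseIdx).
def bLoop (banned : PySem.Set String) : List Int → List String × Bool → List String × Bool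
  | [], st => st
  | i :: is, (kept, changed) =>
    match PySem.List.pyGet? kept i with
    | some x =>
        if PySem.Set.contains banned x then
          bLoop banned is (kept.eraseIdx i.toNat, true)
        else
          bLoop banned is (kept, changed)
    | none => bLoop banned is (kept, changed)

def remove_options_alt (existing_options : List String) (options_to_remove : List String) : Bool × List String × List String :=
  let banned := PySem.Set.ofList options_to_remove
  let st := bLoop banned (PySem.List.pyRange ((existing_options.length : Int) - 1) (-1) (-1)) (existing_options, false)
  (st.2, st.1, [])

-- ===== PRECONDITION & SPEC =====
def Spec_remove_options (existing_options : List String) (options_to_remove : List String) (out : Bool × List String × List String) : Prop := out = remove_options_alt existing_options options_to_remove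
instance (existing_options : List String) (options_to_remove : List String) (out : Bool × List String × List String) : Decidable (Spec_remove_options existing_options options_to_remove out) := by unfold Spec_remove_options; infer_instance

-- ===== CLAIM (what is proved, stated in full; the proofs are below) =====
def Claim_equal_remove_options : Prop := ∀ (existing_options : List String) (options_to_remove : List String), Dom_remove_options existing_options options_to_remove → Spec_remove_options existing_options options_to_remove (remove_options existing_options options_to_remove)

-- ===== LEMMAS AND PROOFS =====

-- erasing the element just after a prefix
theorem pv_eraseIdx_append (pre : List String) (a : String) (suf : List String) :
    (pre ++ a :: suf).eraseIdx pre.length = pre ++ suf := by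
  induction pre with
  | nil => simp
  | cons x xs ih => simp [ih]

-- the loop, run over the countdown range of a prefix, filters that prefix in place
theorem pv_bLoop_spec (banned : PySem.Set String) (pre : List String) :
    ∀ (suf : List String) (c : Bool),
      bLoop banned (PySem.List.pyRange ((pre.length : Int) - 1) (-1) (-1)) (pre ++ suf, c)
        = (pre.filter (fun x => !(PySem.Set.contains banned x)) ++ suf,
           c || pre.any (fun x => PySem.Set.contains banned x)) := by
  induction pre using List.reverseRecOn with
  | nil =>
    intro suf c
    rw [PySem.List.pyRange_neg_one_eq_nil (by norm_num)]
    simp [bLoop]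
  | append_singleton pre' a ih =>
    intro suf c
    have hlen : ((pre' ++ [a]).length : Int) - 1 = (pre'.length : Int) := by
      simp
    rw [hlen, PySem.List.pyRange_neg_one_cons (by omega)]
    have hassoc : (pre' ++ [a]) ++ suf = pre' ++ a :: suf := by simp
    rw [hassoc]
    show bLoop banned (_ :: _) (pre' ++ a :: suf, c) = _
    rw [bLoop, PySem.List.pyGet?_append_length]
    dsimp only
    by_cases hb : PySem.Set.contains banned a = true
    · rw [if_pos hb]
      rw [show ((pre'.length : Int)).toNat = pre'.length from Int.toNat_natCast _]
      rw [pv_eraseIdx_append]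
      have := ih suf true
      rw [show ((pre'.length : Int)) - 1 = ((pre'.length : Int) - 1) from rfl]
      rw [this]
      have hm : a ∈ banned := by simpa using hb
      simp [List.filter_append, List.any_append, hm]
    · rw [if_neg hb]
      have := ih (a :: suf) c
      rw [this]
      simp at hb
      simp [hb, List.filter_append, List.any_append]

-- the intersection guard is nonempty iff some element of eo is banned
theorem pv_inter_ne_nil_iff (eo otr : List String) :
    (PySem.Set.inter (PySem.Set.ofList eo) (PySem.Set.ofList otr)) ≠ [] ↔ ∃ x ∈ eo, x ∈ otr := by
  constructor
  · intro h
    obtain ⟨x, hx⟩ := List.exists_mem_of_ne_nil _ h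
    have hm := (PySem.Set.mem_inter (s := PySem.Set.ofList eo) (t := PySem.Set.ofList otr) (y := x)).mp hx
    exact ⟨x, by simpa [PySem.Set.mem_ofList] using hm⟩
  · rintro ⟨x, hxe, hxr⟩ hnil
    have hx : x ∈ PySem.Set.inter (PySem.Set.ofList eo) (PySem.Set.ofList otr) := by
      rw [PySem.Set.mem_inter]
      simp [PySem.Set.mem_ofList, hxe, hxr]
    rw [hnil] at hx
    simp at hx

-- membership predicates of the two ports coincide
theorem pv_pred_eq (otr : List String) :
    (fun o => !(PySem.Set.contains (PySem.Set.ofList otr) o)) = (fun o : String => !(otr.contains o)) := by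
  funext o
  by_cases h : o ∈ otr
  · simp [PySem.Set.mem_ofList, h]
  · simp [PySem.Set.mem_ofList, h]

-- ===== VERDICT (by name: the statement is the Claim_ definition above) =====
theorem remove_options_spec : Claim_equal_remove_options := by
  intro eo otr _
  unfold Spec_remove_options remove_options remove_options_alt
  dsimp only
  have hB := pv_bLoop_spec (PySem.Set.ofList otr) eo [] false
  rw [List.append_nil] at hB
  rw [hB]
  rw [pv_pred_eq]
  have hany : eo.any (fun x => PySem.Set.contains (PySem.Set.ofList otr) x) = true ↔ ∃ x ∈ eo, x ∈ otr := by
    simp [List.any_eq_true, PySem.Set.mem_ofList]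
  by_cases h : (PySem.Set.inter (PySem.Set.ofList eo) (PySem.Set.ofList otr)) ≠ []
  · rw [if_pos h]
    have hex := (pv_inter_ne_nil_iff eo otr).mp h
    have hrem : (eo.filter (fun o => !(otr.contains o))).filter (fun o => otr.contains o) = [] := by
      rw [List.filter_eq_nil_iff]
      intro a ha
      simpa using List.of_mem_filter ha
    rw [hrem, hany.mpr hex]
    simp
  · rw [if_neg h]
    push Not at h
    have hnone : ¬ ∃ x ∈ eo, x ∈ otr := fun hex => (h ▸ (pv_inter_ne_nil_iff eo otr).mpr hex) rfl
    have hself : eo.filter (fun o => !(otr.contains o)) = eo :=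
      List.filter_eq_self.mpr (fun a ha => by
        have : a ∉ otr := fun hm => hnone ⟨a, ha, hm⟩
        simp [this])
    have hanyf : eo.any (fun x => PySem.Set.contains (PySem.Set.ofList otr) x) = false := by
      rw [Bool.eq_false_iff]
      intro hx
      exact hnone (hany.mp hx)
    rw [hself, hanyf]
    simp
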